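-- pv_equiv track=rewrite | github.com/njclement/coding-portfolio | euler194/coloratile.py | enumerate2
-- ===== SOURCE A (Python) =====
-- def enumerate2(C):
--     colors = []
--     for i in range(1,C+1):
--         colors.append(i)
--     count = 0
--     for C1 in colors:
--         for C2 in colors:
--             for C3 in colors:
--                 for C4 in colors:
--                     for C5 in colors:
--                         broken = False
--                         if (1 == C1):
--                             broken = True
--                         elif (1 == C2):
--                             broken = True
--                         elif (2 == C4):
--                             broken = True
--                         elif (C1 == C2):
--                             broken = True
--                         elif (C2 == C3):
--                             broken = True
--                         elif (C3 == C4):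
--                             broken = True
--                         elif (C4 == C5):
--                             broken = True
--                         elif (C1 == C5):
--                             broken = True
--                         if (broken == False):
--                             count += 1
--     return(count)
-- ===== SOURCE B (Python) =====
-- def enumerate2(C):
--     # Closed form: the constraints are a 5-cycle C1-C2-C3-C4-C5-C1 of inequalities
--     # plus C1 != 1, C2 != 1, C4 != 2; summing the counts level by level gives the
--     # polynomial (C-2)^3 * (C^2 - 2C + 3), valid for C >= 2 (0 otherwise).
--     if C < 2:
--         return 0
--     return (C - 2) ** 3 * (C * C - 2 * C + 3)
-- ===== Notes on version B (the rewrite author's own statement) =====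
-- stated objective: faster
-- what changed: Replaced the O(C^5) quintuple nested loop by a closed-form polynomial (C-2)^3*(C^2-2C+3), derived by evaluating the constrained sum level by level.
import Mathlib
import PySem

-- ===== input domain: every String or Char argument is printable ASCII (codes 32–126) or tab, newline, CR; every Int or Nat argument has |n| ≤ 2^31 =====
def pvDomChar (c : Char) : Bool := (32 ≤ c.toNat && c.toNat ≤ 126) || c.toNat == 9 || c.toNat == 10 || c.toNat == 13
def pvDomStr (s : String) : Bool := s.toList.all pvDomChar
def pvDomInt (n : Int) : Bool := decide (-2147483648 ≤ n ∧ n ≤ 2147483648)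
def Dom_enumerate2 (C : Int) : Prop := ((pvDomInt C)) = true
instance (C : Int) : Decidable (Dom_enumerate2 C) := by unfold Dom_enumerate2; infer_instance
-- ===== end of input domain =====

-- B replaces A's O(C^5) quintuple loop by a closed-form polynomial (objective: faster).

-- ===== PORT A =====
def enumerate2 (C : Int) : Int :=
  let colors : List Int := (PySem.List.pyRange 1 (C+1) 1).foldl (fun acc i => acc ++ [i]) []
  colors.foldl (fun count c1 =>
    colors.foldl (fun count c2 =>
      colors.foldl (fun count c3 =>
        colors.foldl (fun count c4 =>
          colors.foldl (fun count c5 =>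
            let broken : Bool :=
              if 1 = c1 then true
              else if 1 = c2 then true
              else if 2 = c4 then true
              else if c1 = c2 then true
              else if c2 = c3 then true
              else if c3 = c4 then true
              else if c4 = c5 then true
              else if c1 = c5 then true
              else false
            if broken = false then count + 1 else count)
          count) count) count) count) 0

-- ===== PORT B =====
def enumerate2_alt (C : Int) : Int :=
  if C < 2 then 0 else (C - 2) ^ 3 * (C * C - 2 * C + 3)

-- ===== PRECONDITION & SPEC =====
def Spec_enumerate2 (C : Int) (out : Int) : Prop := out = enumerate2_alt C
instance (C : Int) (out : Int) : Decidable (Spec_enumerate2 C out) := by unfold Spec_enumerate2; infer_instance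

-- ===== CLAIM (what is proved, stated in full; the proofs are below) =====
def Claim_equal_enumerate2 : Prop := ∀ (C : Int), Dom_enumerate2 C → Spec_enumerate2 C (enumerate2 C)

-- ===== LEMMAS AND PROOFS =====

-- generic summation helpers over Finset.range
lemma sum_map_range (f : ℕ → ℤ) (n : ℕ) :
    ((List.range n).map f).sum = ∑ i ∈ Finset.range n, f i := by
  induction n with
  | zero => simp
  | succ m ih => simp [List.range_succ, Finset.sum_range_succ, ih]

lemma sum_pick (n t : ℕ) (f : ℕ → ℤ) (ht : t < n) :
    (∑ x ∈ Finset.range n, if x = t then f x else 0) = f t := by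
  rw [Finset.sum_ite_eq' (Finset.range n) t f]
  simp [Finset.mem_range.mpr ht]

lemma sum_erase1 (n t : ℕ) (f : ℕ → ℤ) (ht : t < n) :
    (∑ x ∈ Finset.range n, if x ≠ t then f x else 0)
      = (∑ x ∈ Finset.range n, f x) - f t := by
  have h1 : (∑ x ∈ Finset.range n, f x)
      = ∑ x ∈ Finset.range n, ((if x = t then f x else 0) + (if x ≠ t then f x else 0)) :=
    Finset.sum_congr rfl (by intro x _; by_cases hx : x = t <;> simp [hx])
  rw [Finset.sum_add_distrib, sum_pick n t f ht] at h1
  linarith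

lemma sum_erase2 (n t u : ℕ) (f : ℕ → ℤ) (ht : t < n) (hu : u < n) (htu : t ≠ u) :
    (∑ x ∈ Finset.range n, if x ≠ t ∧ x ≠ u then f x else 0)
      = (∑ x ∈ Finset.range n, f x) - f t - f u := by
  have h0 : ∀ x, (if x ≠ t ∧ x ≠ u then f x else 0)
      = (if x ≠ t then (if x ≠ u then f x else 0) else 0) := by
    intro x; by_cases h1 : x = t <;> by_cases h2 : x = u <;> simp [h1, h2]
  simp only [h0]
  rw [sum_erase1 n t _ ht, sum_erase1 n u f hu]
  simp [htu]
  ring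

lemma sum_const_range (n : ℕ) (c : ℤ) : (∑ _x ∈ Finset.range n, c) = (n : ℤ) * c := by
  simp [Finset.sum_const, mul_comm]

-- closed-form pieces of the level-by-level evaluation
def KK (n a : ℕ) : ℤ :=
  ((n:ℤ)-2) * ((n:ℤ)*((n:ℤ)-2)+1) + (if a ≠ 1 then (n:ℤ)-1 else 0)

def gg (n a b : ℕ) : ℤ :=
  ((n:ℤ)-2) * ((n:ℤ) - (if b = 1 then 1 else 2)) + (if a ≠ 1 ∧ a ≠ b then 1 else 0)

def EE (n a : ℕ) : ℤ :=
  ((n:ℤ)-3) * KK n a + ((n:ℤ)-2)^2 + (if a ≠ 1 then 1 else 0)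
    + ((n:ℤ)-2)*((n:ℤ) - (if a = 1 then 1 else 2))

-- innermost sum (over c5)
lemma L5 (n d a : ℕ) (hd : d < n) (ha : a < n) :
    (∑ e ∈ Finset.range n, if e ≠ d ∧ e ≠ a then (1:ℤ) else 0)
      = (n:ℤ) - (if d = a then 1 else 2) := by
  by_cases h : d = a
  · subst h
    simp only [and_self]
    rw [sum_erase1 n d _ hd, sum_const_range]
    simp
  · rw [sum_erase2 n d a _ hd ha h, sum_const_range]
    simp [h]
    ring

-- sum over c4 of the L5 value under the c4-constraints
lemma sumh (n a : ℕ) (hn : 2 ≤ n) (ha : a < n) :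
    (∑ d ∈ Finset.range n, ((n:ℤ) - (if d = a then 1 else 2)))
      = (n:ℤ)*((n:ℤ)-2) + 1 := by
  have h0 : ∀ d : ℕ, ((n:ℤ) - (if d = a then 1 else 2))
      = ((n:ℤ)-2) + (if d = a then (1:ℤ) else 0) := by
    intro d; by_cases h : d = a <;> simp [h] <;> ring
  simp only [h0]
  rw [Finset.sum_add_distrib, sum_const_range, sum_pick n a _ ha]

lemma L4 (n c a : ℕ) (hn : 2 ≤ n) (hc : c < n) (ha : a < n) :
    (∑ d ∈ Finset.range n, if d ≠ 1 ∧ d ≠ c then ((n:ℤ) - (if d = a then 1 else 2)) else 0)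
      = gg n a c := by
  have h1n : 1 < n := hn
  by_cases hc1 : c = 1
  · subst hc1
    simp only [and_self]
    rw [sum_erase1 n 1 _ h1n, sumh n a hn ha]
    unfold gg
    by_cases ha1 : a = 1 <;> simp [ha1, Ne.symm] <;> try ring
  · rw [sum_erase2 n 1 c _ h1n hc (Ne.symm hc1), sumh n a hn ha]
    unfold gg
    by_cases ha1 : a = 1
    · subst ha1; simp [hc1, Ne.symm hc1]; ring
    · by_cases hac : a = c
      · subst hac; simp [ha1, Ne.symm ha1, hc1]; ring
      · simp [ha1, Ne.symm ha1, hac, Ne.symm hac, hc1]; ring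

-- sum over all c of gg
lemma sumg (n a : ℕ) (hn : 2 ≤ n) (ha : a < n) :
    (∑ c ∈ Finset.range n, gg n a c) = KK n a := by
  have h1n : 1 < n := hn
  unfold gg KK
  rw [Finset.sum_add_distrib]
  have h0 : ∀ c : ℕ, ((n:ℤ)-2) * ((n:ℤ) - (if c = 1 then 1 else 2))
      = ((n:ℤ)-2)*((n:ℤ)-2) + (if c = 1 then ((n:ℤ)-2) else 0) := by
    intro c; by_cases h : c = 1 <;> simp [h] <;> ring
  simp only [h0]
  rw [Finset.sum_add_distrib, sum_const_range, sum_pick n 1 _ h1n]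
  by_cases ha1 : a = 1
  · simp [ha1]; ring
  · have h2 : ∀ c : ℕ, (if a ≠ 1 ∧ a ≠ c then (1:ℤ) else 0)
        = (if c ≠ a then (1:ℤ) else 0) := by
      intro c; by_cases h : c = a
      · subst h; simp [ha1]
      · simp [ha1, h]
        exact fun hh => h hh.symm
    simp only [h2]
    rw [sum_erase1 n a _ ha, sum_const_range]
    simp [ha1]; ring

-- sum over c3
lemma L3 (n b a : ℕ) (hn : 2 ≤ n) (hb : b < n) (ha : a < n) :
    (∑ c ∈ Finset.range n, if c ≠ b then gg n a c else 0)
      = KK n a - gg n a b := by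
  rw [sum_erase1 n b _ hb, sumg n a hn ha]

-- sum over c2
lemma L2 (n a : ℕ) (hn : 2 ≤ n) (ha : a < n) (ha0 : a ≠ 0) :
    (∑ b ∈ Finset.range n, if b ≠ 0 ∧ b ≠ a then (KK n a - gg n a b) else 0)
      = EE n a := by
  have h0n : 0 < n := by omega
  rw [sum_erase2 n 0 a _ h0n ha (Ne.symm ha0)]
  have hs : (∑ b ∈ Finset.range n, (KK n a - gg n a b))
      = (n:ℤ) * KK n a - KK n a := by
    rw [Finset.sum_sub_distrib, sumg n a hn ha, sum_const_range]
  rw [hs]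
  unfold EE gg
  by_cases ha1 : a = 1
  · subst ha1; simp [ha0, Ne.symm ha0]; ring
  · simp [ha1, Ne.symm ha1, ha0, Ne.symm ha0]; ring

-- sum over c1
lemma L1 (n : ℕ) (hn : 2 ≤ n) :
    (∑ a ∈ Finset.range n, if a ≠ 0 then EE n a else 0)
      = ((n:ℤ)-2)^3 * ((n:ℤ)*(n:ℤ) - 2*(n:ℤ) + 3) := by
  have h0n : 0 < n := by omega
  have h1n : 1 < n := hn
  rw [sum_erase1 n 0 _ h0n]
  have hK : (∑ a ∈ Finset.range n, KK n a)
      = (n:ℤ) * (((n:ℤ)-2) * ((n:ℤ)*((n:ℤ)-2)+1)) + ((n:ℤ)-1)*((n:ℤ)-1) := by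
    unfold KK
    rw [Finset.sum_add_distrib, sum_const_range]
    have h2 : ∀ a : ℕ, (if a ≠ 1 then ((n:ℤ)-1) else 0)
        = ((n:ℤ)-1) - (if a = 1 then ((n:ℤ)-1) else 0) := by
      intro a; by_cases h : a = 1 <;> simp [h]
    simp only [h2]
    rw [Finset.sum_sub_distrib, sum_const_range, sum_pick n 1 _ h1n]
    ring
  have hE : (∑ a ∈ Finset.range n, EE n a)
      = ((n:ℤ)-3) * (∑ a ∈ Finset.range n, KK n a)
        + (n:ℤ)*((n:ℤ)-2)^2 + ((n:ℤ)-1)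
        + ((n:ℤ)-2)*((n:ℤ)*((n:ℤ)-2)+1) := by
    unfold EE
    rw [Finset.sum_add_distrib, Finset.sum_add_distrib, Finset.sum_add_distrib,
        ← Finset.mul_sum, sum_const_range]
    have h3 : (∑ a ∈ Finset.range n, (if a ≠ 1 then (1:ℤ) else 0)) = (n:ℤ) - 1 := by
      rw [sum_erase1 n 1 _ h1n, sum_const_range]; ring
    have h4 : (∑ a ∈ Finset.range n, ((n:ℤ)-2)*((n:ℤ) - (if a = 1 then 1 else 2)))
        = ((n:ℤ)-2)*((n:ℤ)*((n:ℤ)-2)+1) := by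
      rw [← Finset.mul_sum]
      congr 1
      have h5 : ∀ a : ℕ, ((n:ℤ) - (if a = 1 then 1 else 2))
          = ((n:ℤ)-2) + (if a = 1 then (1:ℤ) else 0) := by
        intro a; by_cases h : a = 1 <;> simp [h] <;> ring
      simp only [h5]
      rw [Finset.sum_add_distrib, sum_const_range, sum_pick n 1 _ h1n]
    rw [h3, h4]
  rw [hE, hK]
  unfold EE KK
  simp
  ring

-- the quintuple sum with the nested-guard indicator, evaluated
lemma quint (n : ℕ) (hn : 2 ≤ n) :
    (∑ a ∈ Finset.range n, if a ≠ 0 then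
      (∑ b ∈ Finset.range n, if b ≠ 0 ∧ b ≠ a then
        (∑ c ∈ Finset.range n, if c ≠ b then
          (∑ d ∈ Finset.range n, if d ≠ 1 ∧ d ≠ c then
            (∑ e ∈ Finset.range n, if e ≠ d ∧ e ≠ a then (1:ℤ) else 0)
            else 0) else 0) else 0) else 0)
      = ((n:ℤ)-2)^3 * ((n:ℤ)*(n:ℤ) - 2*(n:ℤ) + 3) := by
  rw [← L1 n hn]
  refine Finset.sum_congr rfl (fun a hamem => ?_)
  have ha : a < n := Finset.mem_range.mp hamem
  by_cases ha0 : a = 0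
  · rw [if_neg (not_not_intro ha0), if_neg (not_not_intro ha0)]
  · rw [if_pos ha0, if_pos ha0, ← L2 n a hn ha ha0]
    refine Finset.sum_congr rfl (fun b hbmem => ?_)
    have hb : b < n := Finset.mem_range.mp hbmem
    by_cases hbg : b ≠ 0 ∧ b ≠ a
    · rw [if_pos hbg, if_pos hbg, ← L3 n b a hn hb ha]
      refine Finset.sum_congr rfl (fun c hcmem => ?_)
      have hc : c < n := Finset.mem_range.mp hcmem
      by_cases hcg : c ≠ b
      · rw [if_pos hcg, if_pos hcg, ← L4 n c a hn hc ha]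
        refine Finset.sum_congr rfl (fun d hdmem => ?_)
        have hd : d < n := Finset.mem_range.mp hdmem
        by_cases hdg : d ≠ 1 ∧ d ≠ c
        · rw [if_pos hdg, if_pos hdg]
          exact L5 n d a hd ha
        · rw [if_neg hdg, if_neg hdg]
      · rw [if_neg hcg, if_neg hcg]
    · rw [if_neg hbg, if_neg hbg]

-- the if-chain body of A's innermost loop as a 0/1 summand
lemma body_eq (c1 c2 c3 c4 c5 count : ℤ) :
    (if (if 1 = c1 then true
        else if 1 = c2 then true
        else if 2 = c4 then true
        else if c1 = c2 then true
        else if c2 = c3 then true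
        else if c3 = c4 then true
        else if c4 = c5 then true
        else if c1 = c5 then true
        else false) = false then count + 1 else count)
      = count + (if ¬(1 = c1) ∧ ¬(1 = c2) ∧ ¬(2 = c4) ∧ ¬(c1 = c2) ∧ ¬(c2 = c3)
          ∧ ¬(c3 = c4) ∧ ¬(c4 = c5) ∧ ¬(c1 = c5) then (1:ℤ) else 0) := by
  split_ifs <;> simp_all

-- translation of the value-level condition (colors 1..n) to 0-based indices
lemma transIdx (a b c d e : ℕ) :
    (if ¬((1:ℤ) = 1 + a) ∧ ¬((1:ℤ) = 1 + b) ∧ ¬((2:ℤ) = 1 + d)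
        ∧ ¬((1:ℤ) + a = 1 + b) ∧ ¬((1:ℤ) + b = 1 + c) ∧ ¬((1:ℤ) + c = 1 + d)
        ∧ ¬((1:ℤ) + d = 1 + e) ∧ ¬((1:ℤ) + a = 1 + e) then (1:ℤ) else 0)
      = (if a ≠ 0 then (if b ≠ 0 ∧ b ≠ a then (if c ≠ b then
          (if d ≠ 1 ∧ d ≠ c then (if e ≠ d ∧ e ≠ a then (1:ℤ) else 0) else 0)
          else 0) else 0) else 0) := by
  split_ifs <;> first | rfl | (exfalso; omega)

-- A's fold equals the quintuple sum over 0-based indices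
-- sums of an if whose condition ignores the summation variable
lemma sum_if_const {p : Prop} [Decidable p] (s : Finset ℕ) (f : ℕ → ℤ) :
    (∑ x ∈ s, if p then f x else 0) = if p then ∑ x ∈ s, f x else 0 := by
  split <;> simp

lemma portA_eq_sum (C : Int) :
    enumerate2 C
      = (∑ a ∈ Finset.range C.toNat, if a ≠ 0 then
          (∑ b ∈ Finset.range C.toNat, if b ≠ 0 ∧ b ≠ a then
            (∑ c ∈ Finset.range C.toNat, if c ≠ b then
              (∑ d ∈ Finset.range C.toNat, if d ≠ 1 ∧ d ≠ c then
                (∑ e ∈ Finset.range C.toNat, if e ≠ d ∧ e ≠ a then (1:ℤ) else 0)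
                else 0) else 0) else 0) else 0) := by
  unfold enumerate2
  rw [PySem.List.foldl_append_singleton_eq_self, List.nil_append,
      PySem.List.pyRange_one]
  have hn : ((C + 1 - 1)).toNat = C.toNat := by norm_num
  rw [hn]
  simp only [body_eq, PySem.List.foldl_add, List.map_map, Function.comp,
    sum_map_range, zero_add, transIdx, sum_if_const]

-- ===== VERDICT (by name: the statement is the Claim_ definition above) =====
theorem enumerate2_spec : Claim_equal_enumerate2 := by
  intro C _
  unfold Spec_enumerate2 enumerate2_alt
  rw [portA_eq_sum]
  by_cases h : C < 2
  · rw [if_pos h]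
    have h01 : C.toNat = 0 ∨ C.toNat = 1 := by omega
    rcases h01 with h0 | h1
    · rw [h0]; simp
    · rw [h1]; simp [Finset.sum_range_one]
  · have h2 : 2 ≤ C.toNat := by omega
    rw [quint C.toNat h2]
    have hC : (C.toNat : ℤ) = C := by omega
    rw [hC]
    simp [h]
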